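-- pv_equiv track=rewrite | github.com/zhenguwu/lutron-rf | main.py | mapFreqsToVal
-- ===== SOURCE A (Python) =====
-- def mapFreqsToVal(freqs):
--     vals = []
--     for freq in freqs:
--         if freq > 8:
--             vals.append(2)
--         elif freq > 4:
--             vals.append(1)
--         else:
--             vals.append(0)
--     return vals
-- ===== SOURCE B (Python) =====
-- def mapFreqsToVal(freqs):
--     # Bucket = insertion point of freq in the sorted threshold table,
--     # found by binary search (count of thresholds strictly below freq).
--     thresholds = [4, 8]
--     def bucket(f):
--         lo, hi = 0, len(thresholds)
--         while lo < hi: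
--             mid = (lo + hi) // 2
--             if thresholds[mid] < f:
--                 lo = mid + 1
--             else:
--                 hi = mid
--         return lo
--     return list(map(bucket, freqs))
-- ===== Notes on version B (the rewrite author's own statement) =====
-- stated objective: alternative
-- what changed: Replaces the if/elif/else cascade with a sorted threshold table and a hand-written binary search computing each bucket as the insertion point of the frequency among the thresholds 4 and 8.
import Mathlib
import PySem

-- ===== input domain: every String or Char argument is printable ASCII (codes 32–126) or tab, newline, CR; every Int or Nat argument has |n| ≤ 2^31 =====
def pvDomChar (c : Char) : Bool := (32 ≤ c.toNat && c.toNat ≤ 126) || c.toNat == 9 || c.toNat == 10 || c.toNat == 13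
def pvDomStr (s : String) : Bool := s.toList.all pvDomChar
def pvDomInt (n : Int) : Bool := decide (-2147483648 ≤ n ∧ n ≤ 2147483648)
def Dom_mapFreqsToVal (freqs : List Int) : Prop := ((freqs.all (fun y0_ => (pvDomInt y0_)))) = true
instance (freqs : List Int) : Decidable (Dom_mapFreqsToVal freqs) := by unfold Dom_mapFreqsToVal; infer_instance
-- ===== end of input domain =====

-- ===== PORT A =====
-- A: loop appending 2/1/0 via an if/elif/else cascade
def mapFreqsToVal (freqs : List Int) : List Int :=
  freqs.foldl (fun vals freq =>
    if freq > 8 then vals ++ [2]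
    else if freq > 4 then vals ++ [1]
    else vals ++ [0]) []

-- ===== PORT B =====
-- B: sorted threshold table + binary search; bucket = insertion point of freq in [4, 8]
-- (the while-loop of Source B's `bucket`, recursion on the shrinking interval hi - lo)
def pvBucketGo (thresholds : List Int) (f : Int) (lo hi : Nat) : Nat :=
  if _h : lo < hi then
    let mid := (lo + hi) / 2
    if thresholds.getD mid 0 < f then pvBucketGo thresholds f (mid + 1) hi
    else pvBucketGo thresholds f lo mid
  else lo
termination_by hi - lo
decreasing_by all_goals omega

def mapFreqsToVal_alt (freqs : List Int) : List Int :=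
  freqs.map (fun f => (pvBucketGo [4, 8] f 0 2 : Int))

-- ===== PRECONDITION & SPEC =====
def Spec_mapFreqsToVal (freqs : List Int) (out : List Int) : Prop := out = mapFreqsToVal_alt freqs
instance (freqs : List Int) (out : List Int) : Decidable (Spec_mapFreqsToVal freqs out) := by unfold Spec_mapFreqsToVal; infer_instance

-- ===== CLAIM (what is proved, stated in full; the proofs are below) =====
def Claim_equal_mapFreqsToVal : Prop := ∀ (freqs : List Int), Dom_mapFreqsToVal freqs → Spec_mapFreqsToVal freqs (mapFreqsToVal freqs)

-- ===== LEMMAS AND PROOFS =====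
-- The binary search over [4, 8] on the full interval [0, 2) computes exactly A's cascade value.
theorem bucket_eq_cascade (f : Int) :
    (pvBucketGo [4, 8] f 0 2 : Int) = if f > 8 then 2 else if f > 4 then 1 else 0 := by
  rw [pvBucketGo]; simp only [show (0:Nat) < 2 from by omega, dif_pos, show ((0:Nat)+2)/2 = 1 from rfl]
  by_cases h8 : (8:Int) < f <;> by_cases h4 : (4:Int) < f <;>
    simp [pvBucketGo, h8, h4]

theorem foldl_eq_map (freqs : List Int) (acc : List Int) :
    freqs.foldl (fun vals freq =>
      if freq > 8 then vals ++ [2]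
      else if freq > 4 then vals ++ [1]
      else vals ++ [0]) acc
    = acc ++ freqs.map (fun f => (pvBucketGo [4, 8] f 0 2 : Int)) := by
  induction freqs generalizing acc with
  | nil => simp
  | cons f t ih =>
    simp only [List.foldl_cons, List.map_cons, bucket_eq_cascade]
    split_ifs with h1 h2 <;> rw [ih] <;>
      simp only [List.append_assoc, List.singleton_append, List.cons.injEq,
        List.append_cancel_left_eq] <;>
      exact ⟨trivial, List.map_congr_left fun a _ => bucket_eq_cascade a⟩

-- ===== VERDICT (by name: the statement is the Claim_ definition above) =====
theorem mapFreqsToVal_spec : Claim_equal_mapFreqsToVal := by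
  intro freqs _
  unfold Spec_mapFreqsToVal mapFreqsToVal mapFreqsToVal_alt
  simpa using foldl_eq_map freqs []
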